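-- pv_equiv track=rewrite | github.com/uqcyber/VeriSmart | EVM_Vale/casestudies/vale_linecount.py | strip_asserts
-- ===== SOURCE A (Python) =====
-- def strip_asserts(code):
--     """Remove all assert, assume and lemma statements from code."""
--     out = []
--     in_assert = False
--     for line in code:
--         if line.startswith("assert") or line.startswith("assume") or line.startswith("lemma_"):
--             in_assert = True
--         if not in_assert:
--             out.append(line)
--         if in_assert and line.endswith(";"):
--             in_assert = False
--     return out
-- ===== SOURCE B (Python) =====
-- def strip_asserts(code):
--     """Remove all assert, assume and lemma statements from code."""
--     out = []
--     it = iter(code)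
--     for line in it:
--         if line.startswith(("assert", "assume", "lemma_")):
--             if line.endswith(";"):
--                 continue
--             for nxt in it:
--                 if nxt.endswith(";"):
--                     break
--         else:
--             out.append(line)
--     return out
-- ===== Notes on version B (the rewrite author's own statement) =====
-- stated objective: alternative
-- what changed: Replaces A's boolean state-machine flag with an explicit iterator whose nested inner loop consumes a whole assert/assume/lemma block up to its terminating ';' line.
import Mathlib
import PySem

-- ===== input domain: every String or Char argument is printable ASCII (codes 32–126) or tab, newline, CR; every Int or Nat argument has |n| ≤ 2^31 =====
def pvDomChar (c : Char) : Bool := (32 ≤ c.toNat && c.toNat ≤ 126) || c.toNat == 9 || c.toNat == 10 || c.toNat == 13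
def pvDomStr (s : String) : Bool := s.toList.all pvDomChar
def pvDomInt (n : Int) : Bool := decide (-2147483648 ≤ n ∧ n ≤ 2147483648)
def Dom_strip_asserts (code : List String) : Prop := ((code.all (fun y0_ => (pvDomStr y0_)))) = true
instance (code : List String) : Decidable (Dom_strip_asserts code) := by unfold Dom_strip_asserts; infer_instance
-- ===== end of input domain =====

-- B replaces A's boolean flag state machine by an explicit block-consuming inner loop (alternative decomposition, same cost).

-- ===== PORT A =====
-- helper: the prefix test shared by both sources
def pvIsAssertStart (line : String) : Bool :=
  PySem.Str.startswith line "assert" || PySem.Str.startswith line "assume" || PySem.Str.startswith line "lemma_"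

def strip_asserts (code : List String) : List String :=
  (code.foldl (fun (st : List String × Bool) line =>
      -- if line.startswith(...): in_assert = True
      let ia := if pvIsAssertStart line then true else st.2
      -- if not in_assert: out.append(line)
      let out := if ia = false then st.1 ++ [line] else st.1
      -- if in_assert and line.endswith(";"): in_assert = False
      let ia' := if ia && PySem.Str.endswith line ";" then false else ia
      (out, ia'))
    ([], false)).1

-- ===== PORT B =====
-- inner loop: pull lines from the iterator until one ends with ';' (dropping all of them)
def pvConsumeBlock : List String → List String
  | [] => []
  | l :: rest => if PySem.Str.endswith l ";" then rest else pvConsumeBlock rest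

theorem pvConsumeBlock_length_le : ∀ (xs : List String), (pvConsumeBlock xs).length ≤ xs.length := by
  intro xs
  induction xs with
  | nil => simp [pvConsumeBlock]
  | cons l rest ih =>
    simp only [pvConsumeBlock]
    split
    · simp
    · exact Nat.le_trans ih (Nat.le_succ _)

def strip_asserts_alt (code : List String) : List String :=
  match code with
  | [] => []
  | line :: rest =>
    if pvIsAssertStart line then
      if PySem.Str.endswith line ";" then strip_asserts_alt rest
      else strip_asserts_alt (pvConsumeBlock rest)
    else line :: strip_asserts_alt rest
termination_by code.length
decreasing_by
  · simp
  · exact Nat.lt_succ_of_le (pvConsumeBlock_length_le rest)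
  · simp

-- ===== PRECONDITION & SPEC =====
def Spec_strip_asserts (code : List String) (out : List String) : Prop := out = strip_asserts_alt code
instance (code : List String) (out : List String) : Decidable (Spec_strip_asserts code out) := by unfold Spec_strip_asserts; infer_instance

-- ===== CLAIM (what is proved, stated in full; the proofs are below) =====
def Claim_equal_strip_asserts : Prop := ∀ (code : List String), Dom_strip_asserts code → Spec_strip_asserts code (strip_asserts code)

-- ===== LEMMAS AND PROOFS =====

-- A's loop, written as structural recursion producing the lines appended from flag state `ia`
def pvRunA : List String → Bool → List String
  | [], _ => []
  | line :: rest, ia =>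
    let ia1 := if pvIsAssertStart line then true else ia
    (if ia1 = false then [line] else []) ++
      pvRunA rest (if ia1 && PySem.Str.endswith line ";" then false else ia1)

-- the foldl of port A accumulates exactly pvRunA
theorem pvFoldA_eq_runA : ∀ (code : List String) (out : List String) (ia : Bool),
    (code.foldl (fun (st : List String × Bool) line =>
      let ia := if pvIsAssertStart line then true else st.2
      let out := if ia = false then st.1 ++ [line] else st.1
      let ia' := if ia && PySem.Str.endswith line ";" then false else ia
      (out, ia')) (out, ia)).1 = out ++ pvRunA code ia := by
  intro code
  induction code with
  | nil => intro out ia; simp [pvRunA]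
  | cons line rest ih =>
    intro out ia
    simp only [List.foldl_cons, pvRunA]
    rw [ih]
    by_cases h1 : pvIsAssertStart line = true <;>
      by_cases h2 : PySem.Str.endswith line ";" = true <;>
      cases ia <;> first | simp [h1, h2] | simp [h1]

-- both states of A's machine, characterised in terms of B's two loops
theorem pvRunA_eq_alt : ∀ (code : List String),
    pvRunA code false = strip_asserts_alt code ∧
    pvRunA code true = strip_asserts_alt (pvConsumeBlock code) := by
  intro code
  induction code with
  | nil => simp [pvRunA, pvConsumeBlock, strip_asserts_alt]
  | cons line rest ih =>
    constructor
    · by_cases h1 : pvIsAssertStart line = true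
      · by_cases h2 : PySem.Chars.endswith line.toList [';'] = true <;>
          simp [pvRunA, strip_asserts_alt, PySem.Str.endswith, h1, h2, ih.1, ih.2]
      · simp [pvRunA, strip_asserts_alt, h1, ih.1]
    · by_cases h2 : PySem.Chars.endswith line.toList [';'] = true <;>
        simp [pvRunA, pvConsumeBlock, PySem.Str.endswith, h2, ih.1, ih.2]

-- ===== VERDICT (by name: the statement is the Claim_ definition above) =====
theorem strip_asserts_spec : Claim_equal_strip_asserts := by
  intro code _
  unfold Spec_strip_asserts strip_asserts
  rw [pvFoldA_eq_runA, List.nil_append]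
  exact (pvRunA_eq_alt code).1
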